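-- pv_equiv track=rewrite | github.com/koffmann81/PythonProjects | data_processor.py | startEndWeek
-- ===== SOURCE A (Python) =====
-- def startEndWeek(start, end, weeks):
--     """Find start and end indices for date filtering"""
--     startIndex = None
--     endIndex = None
--     for i in range(len(weeks)):
--         if start in weeks[i]:
--             startIndex = i
--         if end in weeks[i]:
--             endIndex = i
--     return (startIndex, endIndex)
-- ===== SOURCE B (Python) =====
-- def startEndWeek(start, end, weeks):
--     """Find start and end indices for date filtering"""
--     pos = {}
--     for i, wk in enumerate(weeks):
--         for elem in wk:
--             pos[elem] = i
--     return (pos.get(start), pos.get(end))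
-- ===== Notes on version B (the rewrite author's own statement) =====
-- stated objective: alternative
-- what changed: Replaces the per-week membership tests inside the index loop by building a single element-to-last-week-index dict in one enumerate pass and answering both queries with two dict lookups.
import Mathlib
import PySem

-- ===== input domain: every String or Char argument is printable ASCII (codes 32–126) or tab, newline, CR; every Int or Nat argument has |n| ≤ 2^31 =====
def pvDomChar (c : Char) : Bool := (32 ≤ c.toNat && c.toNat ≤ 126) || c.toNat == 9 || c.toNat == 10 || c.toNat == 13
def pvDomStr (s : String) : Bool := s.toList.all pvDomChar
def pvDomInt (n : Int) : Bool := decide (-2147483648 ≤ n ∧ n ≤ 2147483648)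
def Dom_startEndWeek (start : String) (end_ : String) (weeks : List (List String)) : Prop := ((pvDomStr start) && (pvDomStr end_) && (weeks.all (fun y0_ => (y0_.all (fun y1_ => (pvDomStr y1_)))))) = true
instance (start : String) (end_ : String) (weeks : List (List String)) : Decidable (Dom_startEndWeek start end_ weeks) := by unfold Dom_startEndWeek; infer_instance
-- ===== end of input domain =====

-- B builds an element→last-week-index dict in one enumerate pass and answers with two lookups,
-- instead of A's per-week membership tests; same result, alternative structure.

-- ===== PORT A =====
-- for i in range(len(weeks)): if start in weeks[i]: startIndex = i; if end in weeks[i]: endIndex = i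
def startEndWeek (start : String) (end_ : String) (weeks : List (List String)) : Option Int × Option Int :=
  (PySem.List.pyRange 0 (weeks.length : Int) 1).foldl
    (fun (st : Option Int × Option Int) i =>
      let wk := PySem.List.pyGetD weeks i []
      (if start ∈ wk then some i else st.1,
       if end_ ∈ wk then some i else st.2))
    (none, none)

-- ===== PORT B =====
-- pos = {}; for i, wk in enumerate(weeks): for elem in wk: pos[elem] = i
def posDict (weeks : List (List String)) : PySem.Dict String Int :=
  (PySem.List.enumerate weeks 0).foldl
    (fun d p => p.2.foldl (fun d2 elem => d2.insert elem p.1) d)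
    PySem.Dict.empty

def startEndWeek_alt (start : String) (end_ : String) (weeks : List (List String)) : Option Int × Option Int :=
  let pos := posDict weeks
  (pos.get? start, pos.get? end_)

-- ===== PRECONDITION & SPEC =====
def Spec_startEndWeek (start : String) (end_ : String) (weeks : List (List String)) (out : Option Int × Option Int) : Prop := out = startEndWeek_alt start end_ weeks
instance (start : String) (end_ : String) (weeks : List (List String)) (out : Option Int × Option Int) : Decidable (Spec_startEndWeek start end_ weeks out) := by unfold Spec_startEndWeek; infer_instance

-- ===== CLAIM (what is proved, stated in full; the proofs are below) =====
def Claim_equal_startEndWeek : Prop := ∀ (start : String) (end_ : String) (weeks : List (List String)), Dom_startEndWeek start end_ weeks → Spec_startEndWeek start end_ weeks (startEndWeek start end_ weeks)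

-- ===== LEMMAS AND PROOFS =====

-- inserting every element of wk with value i: x ∈ wk ↦ some i, otherwise the dict is unchanged
theorem get?_insert_fold (wk : List String) (i : Int) (d : PySem.Dict String Int) (x : String) :
    (wk.foldl (fun d2 elem => d2.insert elem i) d).get? x
      = if x ∈ wk then some i else d.get? x := by
  induction wk generalizing d with
  | nil => simp
  | cons e rest ih =>
    simp only [List.foldl_cons, ih, List.mem_cons]
    by_cases hx : x ∈ rest
    · simp [hx]
    · by_cases he : x = e
      · subst he; simp [hx, PySem.Dict.get?_insert_self]
      · simp [hx, he, PySem.Dict.get?_insert_of_ne _ _ (by exact he)]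

theorem main_lemma (start end_ : String) (weeks : List (List String)) :
    startEndWeek start end_ weeks = startEndWeek_alt start end_ weeks := by
  induction weeks using List.reverseRecOn with
  | nil =>
    simp [startEndWeek, startEndWeek_alt, posDict, PySem.List.pyRange_one_eq_nil]
  | append_singleton weeks wk ih =>
    have hA : startEndWeek start end_ (weeks ++ [wk])
        = (let st := startEndWeek start end_ weeks
           (if start ∈ wk then some (weeks.length : Int) else st.1,
            if end_ ∈ wk then some (weeks.length : Int) else st.2)) := by
      simp only [startEndWeek, List.length_append, List.length_cons, List.length_nil]
      rw [show ((weeks.length + 1 : Nat) : Int) = (weeks.length : Int) + 1 by push_cast; ring,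
        PySem.List.pyRange_one_succ_right (by positivity), List.foldl_append]
      simp only [List.foldl_cons, List.foldl_nil]
      have hwk : PySem.List.pyGetD (weeks ++ [wk]) (weeks.length : Int) [] = wk := by
        simp [PySem.List.pyGetD, PySem.List.pyGet?, PySem.List.pyIdx?]
      rw [hwk]
      have hpref :
          (PySem.List.pyRange 0 (weeks.length : Int) 1).foldl
            (fun (st : Option Int × Option Int) i =>
              (if start ∈ PySem.List.pyGetD (weeks ++ [wk]) i [] then some i else st.1,
               if end_ ∈ PySem.List.pyGetD (weeks ++ [wk]) i [] then some i else st.2))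
            (none, none)
          = (PySem.List.pyRange 0 (weeks.length : Int) 1).foldl
            (fun (st : Option Int × Option Int) i =>
              (if start ∈ PySem.List.pyGetD weeks i [] then some i else st.1,
               if end_ ∈ PySem.List.pyGetD weeks i [] then some i else st.2))
            (none, none) := by
        apply PySem.List.foldl_congr_mem
        intro st i hi
        have hi' := (PySem.List.mem_pyRange_one).1 hi
        have h0 : 0 ≤ i := hi'.1
        have hlt : i.toNat < weeks.length := by omega
        have hg : PySem.List.pyGetD (weeks ++ [wk]) i [] = PySem.List.pyGetD weeks i [] := by
          rw [PySem.List.pyGetD_eq_getElem _ _ h0 (by simp; omega),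
            PySem.List.pyGetD_eq_getElem _ _ h0 (by omega)]
          exact List.getElem_append_left hlt
        rw [hg]
      rw [hpref]
    have hB : posDict (weeks ++ [wk])
        = wk.foldl (fun d2 elem => d2.insert elem (weeks.length : Int)) (posDict weeks) := by
      simp only [posDict, PySem.List.enumerate_append, List.foldl_append,
        PySem.List.enumerate_cons, PySem.List.enumerate_nil]
      simp
    rw [hA, ih]
    simp only [startEndWeek_alt, hB, get?_insert_fold]

-- ===== VERDICT (by name: the statement is the Claim_ definition above) =====
theorem startEndWeek_spec : Claim_equal_startEndWeek := by
  intro start end_ weeks _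
  unfold Spec_startEndWeek
  exact main_lemma start end_ weeks
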